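-- pv_equiv track=rewrite | github.com/HMFlol/EverybodyCodes | 2024/Quest1/quest1-2.py | potion_master
-- ===== SOURCE A (Python) =====
-- def potion_master(data):
--     # Point values based on x count
--     points = {
--         0: {"A": 1, "B": 2, "C": 4, "D": 6},
--         1: {"A": 0, "B": 1, "C": 3, "D": 5},
--     }
--
--     total = 0
--
--     for i in range(0, len(data), 2):
--         pair = data[i : i + 2]
--         xes = pair.count("x")
--
--         for char in pair:
--             if char != "x":
--                 total += points[xes][char]
--
--     return total
-- ===== SOURCE B (Python) =====
-- def potion_master(data):
--     # Flat pass: sum base values of all non-'x' characters, then subtract 1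
--     # for every full 2-character chunk containing exactly one 'x'.
--     base = {"A": 1, "B": 2, "C": 4, "D": 6}
--     total = sum(base[c] for c in data if c != "x")
--     penalty = sum(
--         1
--         for i in range(0, len(data) - 1, 2)
--         if (data[i] == "x") != (data[i + 1] == "x")
--     )
--     return total - penalty
-- ===== Notes on version B (the rewrite author's own statement) =====
-- stated objective: simpler
-- what changed: Replaces the per-chunk table lookup (nested dict keyed by x-count, inner loop over the pair) with one flat pass summing a single base value per non-'x' character plus a separate count of full chunks holding exactly one 'x', subtracted as a penalty.
import Mathlib
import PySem

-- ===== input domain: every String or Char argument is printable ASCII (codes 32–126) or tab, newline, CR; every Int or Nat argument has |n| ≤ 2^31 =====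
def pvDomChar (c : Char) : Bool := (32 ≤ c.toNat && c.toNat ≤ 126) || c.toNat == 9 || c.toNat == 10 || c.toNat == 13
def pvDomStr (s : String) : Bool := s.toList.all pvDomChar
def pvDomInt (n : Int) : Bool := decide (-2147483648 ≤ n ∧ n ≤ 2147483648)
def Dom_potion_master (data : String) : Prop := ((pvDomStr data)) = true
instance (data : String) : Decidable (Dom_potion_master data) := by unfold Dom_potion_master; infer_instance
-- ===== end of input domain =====

-- B replaces the per-chunk nested-dict lookup with one flat base-value pass plus a
-- subtracted count of full 2-chunks containing exactly one 'x' (objective: simpler).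


-- ===== PORT A =====
-- points = {0: {...}, 1: {...}}; the getD defaults stand for Python's KeyError,
-- which Pre_potion_master excludes (every allowed char makes every lookup hit).
def pvPointsA : PySem.Dict Int (PySem.Dict Char Int) :=
  PySem.Dict.ofList
    [((0 : Int), PySem.Dict.ofList [('A', (1 : Int)), ('B', 2), ('C', 4), ('D', 6)]),
     ((1 : Int), PySem.Dict.ofList [('A', (0 : Int)), ('B', 1), ('C', 3), ('D', 5)])]

def potion_master (data : String) : Int :=
  let l := data.toList
  (PySem.List.pyRange 0 (l.length : Int) 2).foldl
    (fun total i =>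
      let pair := PySem.List.slice l (some i) (some (i + 2))
      let xes : Int := (pair.count 'x' : Int)
      pair.foldl
        (fun t c => if c ≠ 'x' then t + (pvPointsA.getD xes PySem.Dict.empty).getD c 0 else t)
        total)
    0

-- ===== PORT B =====
-- base = {'A':1,'B':2,'C':4,'D':6}; getD default 0 stands for Python's KeyError,
-- excluded by Pre_potion_master.
def pvBaseB : PySem.Dict Char Int :=
  PySem.Dict.ofList [('A', (1 : Int)), ('B', 2), ('C', 4), ('D', 6)]

def potion_master_alt (data : String) : Int :=
  let l := data.toList
  -- total = sum(base[c] for c in data if c != "x")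
  let total := (l.filter (fun c => c ≠ 'x')).foldl (fun t c => t + pvBaseB.getD c 0) 0
  -- penalty = sum(1 for i in range(0, len(data)-1, 2) if (data[i]=='x') != (data[i+1]=='x'))
  -- indices i and i+1 are always in range here, so pyGetD's default is never used
  let penalty := (PySem.List.pyRange 0 ((l.length : Int) - 1) 2).foldl
    (fun p i =>
      if (PySem.List.pyGetD l i ' ' == 'x') != (PySem.List.pyGetD l (i + 1) ' ' == 'x')
      then p + 1 else p)
    0
  total - penalty

-- ===== PRECONDITION & SPEC =====
-- Pre_ excludes exactly the inputs on which A raises KeyError: any character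
-- outside the five allowed letters is looked up in points[xes] and is not a key there.
def Pre_potion_master (data : String) : Prop :=
  (data.toList.all
    (fun c => c == 'A' || c == 'B' || c == 'C' || c == 'D' || c == 'x')) = true
instance (data : String) : Decidable (Pre_potion_master data) := by
  unfold Pre_potion_master; infer_instance

def pvWitness_potion_master : String := "AxBCxD"

def Spec_potion_master (data : String) (out : Int) : Prop := out = potion_master_alt data
instance (data : String) (out : Int) : Decidable (Spec_potion_master data out) := by
  unfold Spec_potion_master; infer_instance

-- ===== CLAIM (what is proved, stated in full; the proofs are below) =====
def Claim_equal_potion_master : Prop :=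
  ∀ (data : String), Dom_potion_master data → Pre_potion_master data →
    Spec_potion_master data (potion_master data)

-- ===== LEMMAS AND PROOFS =====

-- A's per-chunk contribution starting from accumulator 0
def pvChunkA (pair : List Char) : Int :=
  let xes : Int := (pair.count 'x' : Int)
  pair.foldl
    (fun t c => if c ≠ 'x' then t + (pvPointsA.getD xes PySem.Dict.empty).getD c 0 else t)
    0

-- B's per-character value and per-chunk penalty
def pvValB (c : Char) : Int := if c ≠ 'x' then pvBaseB.getD c 0 else 0

def pvPenB (a b : Char) : Int := if ((a == 'x') != (b == 'x')) then 1 else 0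

-- A's loop / B's two passes, as functions of the character list
def pvAloop (l : List Char) : Int :=
  (PySem.List.pyRange 0 (l.length : Int) 2).foldl
    (fun total i =>
      let pair := PySem.List.slice l (some i) (some (i + 2))
      let xes : Int := (pair.count 'x' : Int)
      pair.foldl
        (fun t c => if c ≠ 'x' then t + (pvPointsA.getD xes PySem.Dict.empty).getD c 0 else t)
        total)
    0

def pvBtot (l : List Char) : Int :=
  (l.filter (fun c => c ≠ 'x')).foldl (fun t c => t + pvBaseB.getD c 0) 0

def pvBpen (l : List Char) : Int :=
  (PySem.List.pyRange 0 ((l.length : Int) - 1) 2).foldl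
    (fun p i =>
      if (PySem.List.pyGetD l i ' ' == 'x') != (PySem.List.pyGetD l (i + 1) ' ' == 'x')
      then p + 1 else p)
    0

theorem pvA_eq (s : String) : potion_master s = pvAloop s.toList := rfl
theorem pvB_eq (s : String) : potion_master_alt s = pvBtot s.toList - pvBpen s.toList := rfl

-- an inner fold starting from t is t plus the fold from 0
theorem pvInner_shift (pair : List Char) (xes t : Int) :
    pair.foldl
      (fun t c => if c ≠ 'x' then t + (pvPointsA.getD xes PySem.Dict.empty).getD c 0 else t)
      t
    = t + pair.foldl
      (fun t c => if c ≠ 'x' then t + (pvPointsA.getD xes PySem.Dict.empty).getD c 0 else t)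
      0 := by
  have h : ∀ u : Int, pair.foldl
      (fun t c => if c ≠ 'x' then t + (pvPointsA.getD xes PySem.Dict.empty).getD c 0 else t) u
      = pair.foldl
      (fun t c => t + (if c ≠ 'x' then (pvPointsA.getD xes PySem.Dict.empty).getD c 0 else 0)) u := by
    intro u
    apply PySem.List.foldl_congr_mem
    intro acc x _
    split <;> simp
  rw [h, h, PySem.List.foldl_add, PySem.List.foldl_add]
  ring

-- A's loop is the sum of per-chunk contributions
theorem pvAloop_sum (l : List Char) :
    pvAloop l
      = ((PySem.List.pyRange 0 (l.length : Int) 2).map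
          (fun i => pvChunkA (PySem.List.slice l (some i) (some (i + 2))))).sum := by
  unfold pvAloop
  rw [PySem.List.foldl_congr_mem _ _
      (fun total i => total + pvChunkA (PySem.List.slice l (some i) (some (i + 2)))) 0
      (by
        intro acc i _
        simp only []
        rw [pvInner_shift]
        rfl)]
  rw [PySem.List.foldl_add]
  ring

-- B's penalty is the sum of per-chunk penalties
theorem pvBpen_sum (l : List Char) :
    pvBpen l
      = ((PySem.List.pyRange 0 ((l.length : Int) - 1) 2).map
          (fun i => pvPenB (PySem.List.pyGetD l i ' ') (PySem.List.pyGetD l (i + 1) ' '))).sum := by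
  unfold pvBpen
  rw [PySem.List.foldl_congr_mem _ _
      (fun p i => p + pvPenB (PySem.List.pyGetD l i ' ') (PySem.List.pyGetD l (i + 1) ' ')) 0
      (by
        intro acc i _
        simp only [pvPenB]
        split <;> simp)]
  rw [PySem.List.foldl_add]
  ring

-- peeling the first index off a step-2 range (valid from m = -1 upward)
theorem pvPyRange2_cons (m : Int) (hm : -1 ≤ m) :
    PySem.List.pyRange 0 (m + 2) 2
      = 0 :: (PySem.List.pyRange 0 m 2).map (· + 2) := by
  rw [PySem.List.pyRange_of_pos 0 (m + 2) (by norm_num),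
      PySem.List.pyRange_of_pos 0 m (by norm_num)]
  have hcount : ((m + 2 - 0 + 2 - 1) / 2).toNat
      = (if (0 : Int) < m then ((m - 0 + 2 - 1) / 2).toNat else 0) + 1 := by
    split_ifs <;> omega
  rw [if_pos (by omega : (0 : Int) < m + 2), hcount, List.range_succ_eq_map]
  simp only [List.map_cons, List.map_map]
  congr 1

theorem pvAloop_step (a b : Char) (r : List Char) :
    pvAloop (a :: b :: r) = pvChunkA [a, b] + pvAloop r := by
  rw [pvAloop_sum, pvAloop_sum]
  have hlen : ((a :: b :: r).length : Int) = (r.length : Int) + 2 := by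
    simp; ring
  rw [hlen, pvPyRange2_cons (r.length : Int) (by omega)]
  rw [List.map_cons, List.sum_cons, List.map_map]
  have h0 : PySem.List.slice (a :: b :: r) (some 0) (some (0 + 2)) = [a, b] := by
    rw [PySem.List.slice_toNat _ (by norm_num) (by norm_num)]
    rfl
  rw [h0]
  congr 1
  apply congrArg
  apply List.map_congr_left
  intro i hi
  have hi0 : 0 ≤ i := ((PySem.List.mem_pyRange_iff_of_pos (by norm_num) i).mp hi).1
  obtain ⟨k, rfl⟩ : ∃ k : Nat, i = (k : Int) := ⟨i.toNat, (Int.toNat_of_nonneg hi0).symm⟩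
  simp only [Function.comp_apply]
  have h1 : PySem.List.slice (a :: b :: r) (some ((k : Int) + 2)) (some ((k : Int) + 2 + 2))
      = PySem.List.slice r (some (k : Int)) (some ((k : Int) + 2)) := by
    rw [PySem.List.slice_toNat _ (by positivity) (by positivity),
        PySem.List.slice_toNat _ (by positivity) (by positivity)]
    have e1 : ((k : Int) + 2).toNat = k + 2 := by omega
    have e2 : ((k : Int) + 2 + 2).toNat = k + 4 := by omega
    have e3 : ((k : Int)).toNat = k := by omega
    rw [e1, e2, e3]
    simp [List.drop_succ_cons]
  rw [h1]

theorem pvBtot_step (a : Char) (r : List Char) :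
    pvBtot (a :: r) = pvValB a + pvBtot r := by
  unfold pvBtot pvValB
  have h : ∀ (xs : List Char) (u : Int),
      xs.foldl (fun t c => t + pvBaseB.getD c 0) u
        = u + (xs.map (fun c => pvBaseB.getD c 0)).sum := by
    intro xs u
    exact PySem.List.foldl_add xs _ u
  by_cases hx : a = 'x'
  · subst hx
    simp
  · rw [List.filter_cons_of_pos (by simp [hx])]
    rw [List.foldl_cons, h, h]
    simp [hx]

theorem pvBpen_step (a b : Char) (r : List Char) :
    pvBpen (a :: b :: r) = pvPenB a b + pvBpen r := by
  rw [pvBpen_sum, pvBpen_sum]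
  have hlen : ((a :: b :: r).length : Int) - 1 = ((r.length : Int) - 1) + 2 := by
    simp; ring
  rw [hlen, pvPyRange2_cons ((r.length : Int) - 1) (by
    have : (0 : Int) ≤ (r.length : Int) := by positivity
    omega)]
  rw [List.map_cons, List.sum_cons, List.map_map]
  have h0a : PySem.List.pyGetD (a :: b :: r) 0 ' ' = a := by
    norm_num
  have h0b : PySem.List.pyGetD (a :: b :: r) (0 + 1) ' ' = b := by
    have := PySem.List.pyGetD_natCast (a :: b :: r) 1 ' '
    norm_num at this ⊢
    exact this
  rw [h0a, h0b]
  congr 1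
  apply congrArg
  apply List.map_congr_left
  intro i hi
  have hi0 : 0 ≤ i := ((PySem.List.mem_pyRange_iff_of_pos (by norm_num) i).mp hi).1
  obtain ⟨k, rfl⟩ : ∃ k : Nat, i = (k : Int) := ⟨i.toNat, (Int.toNat_of_nonneg hi0).symm⟩
  simp only [Function.comp_apply]
  have e1 : (k : Int) + 2 = ((k + 2 : Nat) : Int) := by push_cast; ring
  have e2 : (k : Int) + 2 + 1 = ((k + 3 : Nat) : Int) := by push_cast; ring
  have e3 : (k : Int) + 1 = ((k + 1 : Nat) : Int) := by push_cast; ring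
  rw [e2, e1, e3,
      PySem.List.pyGetD_natCast, PySem.List.pyGetD_natCast,
      PySem.List.pyGetD_natCast, PySem.List.pyGetD_natCast]
  simp [List.getD]

-- per-chunk agreement on allowed characters (25 cases)
theorem pvChunk_id (a b : Char)
    (ha : a ∈ (['A', 'B', 'C', 'D', 'x'] : List Char))
    (hb : b ∈ (['A', 'B', 'C', 'D', 'x'] : List Char)) :
    pvChunkA [a, b] = pvValB a + pvValB b - pvPenB a b := by
  fin_cases ha <;> fin_cases hb <;> decide

theorem pvMain : ∀ l : List Char,
    (∀ c ∈ l, c ∈ (['A', 'B', 'C', 'D', 'x'] : List Char)) →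
    pvAloop l = pvBtot l - pvBpen l
  | [], _ => by decide
  | [c], h => by
    have hc := h c (by simp)
    fin_cases hc <;> decide
  | a :: b :: r, h => by
    have ha := h a (by simp)
    have hb := h b (by simp)
    have hr : ∀ c ∈ r, c ∈ (['A', 'B', 'C', 'D', 'x'] : List Char) := by
      intro c hc; exact h c (by simp [hc])
    rw [pvAloop_step, pvBtot_step, pvBtot_step, pvBpen_step,
        pvMain r hr, pvChunk_id a b ha hb]
    ring

-- ===== VERDICT (by name: the statement is the Claim_ definition above) =====
theorem potion_master_spec : Claim_equal_potion_master := by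
  intro data _ hpre
  unfold Spec_potion_master
  rw [pvA_eq, pvB_eq]
  apply pvMain
  intro c hc
  have h := List.all_eq_true.mp hpre c hc
  simp only [Bool.or_eq_true, beq_iff_eq] at h
  simp only [List.mem_cons, List.not_mem_nil, or_false]
  tauto
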